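-- pv_equiv track=rewrite | github.com/ak4shp/T-Days-of-Code | day05/day5_Maximum-profit-from-different-ID.py | solve
-- ===== SOURCE A (Python) =====
-- def solve(uid : list, profit : list, n : int) -> int:
--     sm = 0
--     for i in range(n):
--         for j in range(i + 1, n):
--             tmp = 0
--             if (uid[i] != uid[j]):
--                 tmp = profit[i] + profit[j]
--             if sm <= tmp:
--                 sm = tmp
--
--     return sm
-- ===== SOURCE B (Python) =====
-- def solve(uid, profit, n):
--     if n < 2:
--         return 0
--     best = {}
--     for i in range(n):
--         u, p = uid[i], profit[i]
--         best[u] = max(p, best.get(u, p))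
--     m1 = m2 = None
--     for v in best.values():
--         if m1 is None or v > m1:
--             m1, m2 = v, m1
--         elif m2 is None or v > m2:
--             m2 = v
--     if m2 is None:
--         return 0
--     return max(0, m1 + m2)
-- ===== Notes on version B (the rewrite author's own statement) =====
-- stated objective: faster
-- what changed: Replaced the O(n^2) scan over all index pairs by a single pass that keeps the maximum profit per uid in a dict and then takes the top two per-uid maxima (necessarily of different uids), returning max(0, top1+top2).
-- outside the precondition, e.g. on solve([1, 1], [], 2): A returns 0, B raises IndexError
import Mathlib
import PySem

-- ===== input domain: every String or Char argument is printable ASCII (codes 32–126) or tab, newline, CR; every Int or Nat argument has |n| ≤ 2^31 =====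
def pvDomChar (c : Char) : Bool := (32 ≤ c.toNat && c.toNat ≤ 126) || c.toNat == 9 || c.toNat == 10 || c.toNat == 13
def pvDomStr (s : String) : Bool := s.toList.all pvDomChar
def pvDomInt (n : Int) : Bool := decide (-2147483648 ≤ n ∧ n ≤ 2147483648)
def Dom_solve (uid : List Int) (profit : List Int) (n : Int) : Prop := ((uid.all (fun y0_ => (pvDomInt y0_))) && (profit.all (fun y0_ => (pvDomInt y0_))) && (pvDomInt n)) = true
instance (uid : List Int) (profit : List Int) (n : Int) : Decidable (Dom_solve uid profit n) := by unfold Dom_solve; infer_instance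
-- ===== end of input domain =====

-- B replaces A's O(n^2) scan over all index pairs by one pass keeping the per-uid maximum
-- profit in a dict and then the top two per-uid maxima (objective: faster).

-- ===== PORT A =====
def solve (uid : List Int) (profit : List Int) (n : Int) : Int :=
  (PySem.List.pyRange 0 n 1).foldl (fun sm i =>
    (PySem.List.pyRange (i + 1) n 1).foldl (fun sm j =>
      let tmp : Int :=
        if PySem.List.pyGetD uid i 0 ≠ PySem.List.pyGetD uid j 0 then
          PySem.List.pyGetD profit i 0 + PySem.List.pyGetD profit j 0
        else 0
      if sm ≤ tmp then tmp else sm) sm) 0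

-- ===== PORT B =====
-- best[u] = max(p, best.get(u, p))
def bDictStep (d : PySem.Dict Int Int) (x : Int × Int) : PySem.Dict Int Int :=
  d.insert x.1 (max x.2 (d.getD x.1 x.2))

-- the top-2 accumulator of B's second loop
def bTopStep (s : Option Int × Option Int) (v : Int) : Option Int × Option Int :=
  match s.1 with
  | none => (some v, s.1)
  | some a =>
    if v > a then (some v, s.1)
    else
      match s.2 with
      | none => (s.1, some v)
      | some b => if v > b then (s.1, some v) else s

def solve_alt (uid : List Int) (profit : List Int) (n : Int) : Int :=
  if n < 2 then 0
  else
    let best := (PySem.List.pyRange 0 n 1).foldl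
      (fun d i => bDictStep d (PySem.List.pyGetD uid i 0, PySem.List.pyGetD profit i 0))
      PySem.Dict.empty
    match best.values.foldl bTopStep (none, none) with
    | (some a, some b) => max 0 (a + b)
    | _ => 0

-- ===== PRECONDITION & SPEC =====
-- Pre_ excludes n ≥ 2 with n beyond either list's length: there A's indexing in general
-- raises IndexError, and B's single pass over range(n) raises too (in the sub-case where
-- all of the first n uids are equal and only profit is too short, A happens to return 0
-- before ever touching profit, while B still raises on profit[i]).
def Pre_solve (uid : List Int) (profit : List Int) (n : Int) : Prop :=
  2 ≤ n → (n ≤ (uid.length : Int) ∧ n ≤ (profit.length : Int))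
instance (uid : List Int) (profit : List Int) (n : Int) : Decidable (Pre_solve uid profit n) := by
  unfold Pre_solve; infer_instance

def pvWitness_solve : List Int × List Int × Int := ([1, 2], [3, 4], 2)

def Spec_solve (uid : List Int) (profit : List Int) (n : Int) (out : Int) : Prop := out = solve_alt uid profit n
instance (uid : List Int) (profit : List Int) (n : Int) (out : Int) : Decidable (Spec_solve uid profit n out) := by unfold Spec_solve; infer_instance

-- ===== CLAIM (what is proved, stated in full; the proofs are below) =====
def Claim_equal_solve : Prop := ∀ (uid : List Int) (profit : List Int) (n : Int), Dom_solve uid profit n → Pre_solve uid profit n → Spec_solve uid profit n (solve uid profit n)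

-- ===== LEMMAS AND PROOFS =====

-- the value A's inner branch computes for the ordered pair (x, y)
def pairTmp (x y : Int × Int) : Int := if x.1 ≠ y.1 then x.2 + y.2 else 0

-- all tmp values of A's double loop, in loop order
def tmps : List (Int × Int) → List Int
  | [] => []
  | x :: t => t.map (pairTmp x) ++ tmps t

def buildDict (zs : List (Int × Int)) : PySem.Dict Int Int :=
  zs.foldl bDictStep PySem.Dict.empty

def top2 (l : List Int) : Option Int × Option Int := l.foldl bTopStep (none, none)

-- ---- generic facts ----

theorem foldl_max_le (l : List Int) (s c : Int) (hs : s ≤ c) (h : ∀ x ∈ l, x ≤ c) :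
    l.foldl max s ≤ c := by
  induction l generalizing s with
  | nil => simpa using hs
  | cons y t ih =>
      simp only [List.foldl_cons]
      exact ih (max s y) (max_le hs (h y (by simp))) (fun x hx => h x (by simp [hx]))

theorem perm_pair_cases {α : Type} (a b x y : α) (h : List.Perm [x, y] [a, b]) :
    (x = a ∧ y = b) ∨ (x = b ∧ y = a) := by
  have ha : a ∈ [x, y] := h.mem_iff.mpr (by simp)
  simp at ha
  rcases ha with rfl | rfl
  · left
    have h2 := List.Perm.cons_inv h
    simp at h2
    exact ⟨rfl, h2⟩
  · right
    have h2 := List.Perm.cons_inv ((List.Perm.swap x a ([] : List α)).trans h)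
    simp at h2
    exact ⟨h2, rfl⟩

-- two distinct members of a list form a two-element subpermutation
theorem pair_subperm {α : Type} [DecidableEq α] {l : List α} {x y : α}
    (hx : x ∈ l) (hy : y ∈ l) (hne : x ≠ y) : [x, y].Subperm l := by
  have hy' : y ∈ l.erase x := (List.mem_erase_of_ne hne.symm).mpr hy
  have h1 : [x, y].Sublist (x :: l.erase x) := (List.singleton_sublist.mpr hy').cons₂ x
  exact h1.subperm.trans (List.perm_cons_erase hx).symm.subperm

theorem subperm_map {α β : Type} {l l' : List α} (f : α → β) (h : l.Subperm l') :
    (l.map f).Subperm (l'.map f) := by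
  obtain ⟨m, hm, hs⟩ := h
  exact ⟨m.map f, hm.map f, hs.map f⟩

-- ---- the per-uid maximum dict ----

theorem nodup_keys_foldl_bDictStep (zs : List (Int × Int)) (d : PySem.Dict Int Int)
    (h : d.keys.Nodup) : (zs.foldl bDictStep d).keys.Nodup := by
  induction zs generalizing d with
  | nil => simpa using h
  | cons z t ih => exact ih _ (PySem.Dict.nodup_keys_insert _ _ _ h)

theorem nodup_keys_buildDict (zs : List (Int × Int)) : (buildDict zs).keys.Nodup :=
  nodup_keys_foldl_bDictStep zs _ PySem.Dict.nodup_keys_empty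

theorem foldl_bDictStep_persist (zs : List (Int × Int)) (d : PySem.Dict Int Int) (u m : Int)
    (h : d.get? u = some m) :
    ∃ m', (zs.foldl bDictStep d).get? u = some m' ∧ m ≤ m' := by
  induction zs generalizing d m with
  | nil => exact ⟨m, h, le_refl m⟩
  | cons z t ih =>
      by_cases hu : u = z.1
      · have h2 : (bDictStep d z).get? u = some (max z.2 m) := by
          rw [hu] at h ⊢
          simp [bDictStep, PySem.Dict.getD_eq_get?_getD, h]
        obtain ⟨m', h3, h4⟩ := ih (bDictStep d z) (max z.2 m) h2
        exact ⟨m', h3, le_trans (le_max_right _ _) h4⟩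
      · have h2 : (bDictStep d z).get? u = some m := by
          rw [bDictStep, PySem.Dict.get?_insert_of_ne _ _ hu]; exact h
        exact ih _ _ h2

theorem buildDict_ge (zs : List (Int × Int)) :
    ∀ x ∈ zs, ∃ m, (buildDict zs).get? x.1 = some m ∧ x.2 ≤ m := by
  rw [buildDict]
  generalize PySem.Dict.empty = d
  induction zs generalizing d with
  | nil => intro x hx; simp at hx
  | cons z t ih =>
      intro x hx
      rcases List.mem_cons.mp hx with rfl | hx
      · have h2 : (bDictStep d x).get? x.1 = some (max x.2 (d.getD x.1 x.2)) := by
          simp [bDictStep]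
        obtain ⟨m', h3, h4⟩ := foldl_bDictStep_persist t _ _ _ h2
        exact ⟨m', h3, le_trans (le_max_left _ _) h4⟩
      · exact ih _ x hx

theorem buildDict_mem_aux (zs : List (Int × Int)) (d : PySem.Dict Int Int) (u m : Int)
    (h : (zs.foldl bDictStep d).get? u = some m) :
    (u, m) ∈ zs ∨ d.get? u = some m := by
  induction zs generalizing d with
  | nil => exact Or.inr h
  | cons z t ih =>
      rcases ih _ h with h1 | h1
      · exact Or.inl (List.mem_cons_of_mem _ h1)
      · by_cases hu : u = z.1
        · rw [hu] at h1 ⊢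
          rw [bDictStep, PySem.Dict.get?_insert_self] at h1
          have hm : m = max z.2 (d.getD z.1 z.2) := by injection h1 with h1; omega
          rcases max_choice z.2 (d.getD z.1 z.2) with hc | hc
          · left; rw [hm, hc]; simp
          · cases hg : d.get? z.1 with
            | none =>
                left
                rw [hm, hc]
                simp [PySem.Dict.getD_eq_get?_getD, hg]
            | some q =>
                right
                rw [hm, hc]
                simp [PySem.Dict.getD_eq_get?_getD, hg]
        · right; rw [bDictStep, PySem.Dict.get?_insert_of_ne _ _ hu] at h1; exact h1

theorem buildDict_mem (zs : List (Int × Int)) :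
    ∀ u m, (buildDict zs).get? u = some m → (u, m) ∈ zs := by
  intro u m h
  rcases buildDict_mem_aux zs _ u m h with h1 | h1
  · exact h1
  · simp [PySem.Dict.get?_empty] at h1

-- ---- the top-2 fold invariant ----

theorem top2_inv (l : List Int) :
    (top2 l = (none, none) ∧ l = []) ∨
    (∃ a, top2 l = (some a, none) ∧ l = [a]) ∨
    (∃ a b r, top2 l = (some a, some b) ∧ l.Perm (a :: b :: r) ∧ b ≤ a ∧ ∀ x ∈ r, x ≤ b) := by
  induction l using List.reverseRecOn with
  | nil => left; exact ⟨rfl, rfl⟩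
  | append_singleton t v ih =>
      have hstep : top2 (t ++ [v]) = bTopStep (top2 t) v := by
        simp [top2, List.foldl_append]
      rcases ih with ⟨h1, h2⟩ | ⟨a, h1, h2⟩ | ⟨a, b, r, h1, h2, h3, h4⟩
      · right; left
        exact ⟨v, by rw [hstep, h1]; rfl, by simp [h2]⟩
      · right; right
        subst h2
        by_cases hv : v > a
        · exact ⟨v, a, [], by rw [hstep, h1]; simp [bTopStep, hv], by simp [List.Perm.swap],
            le_of_lt hv, by simp⟩
        · exact ⟨a, v, [], by rw [hstep, h1]; simp [bTopStep, hv], by simp, by omega, by simp⟩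
      · right; right
        by_cases hv : v > a
        · refine ⟨v, a, b :: r, by rw [hstep, h1]; simp [bTopStep, hv], ?_, le_of_lt hv, ?_⟩
          · exact (List.perm_append_singleton v t).trans (h2.cons v)
          · intro x hx; rcases List.mem_cons.mp hx with rfl | hx
            · exact h3
            · exact le_trans (h4 x hx) h3
        · by_cases hv2 : v > b
          · refine ⟨a, v, b :: r, by rw [hstep, h1]; simp [bTopStep, hv, hv2], ?_, by omega, ?_⟩
            · exact ((List.perm_append_singleton v t).trans (h2.cons v)).trans (List.Perm.swap a v _)
            · intro x hx; rcases List.mem_cons.mp hx with rfl | hx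
              · omega
              · exact le_trans (h4 x hx) (by omega)
          · refine ⟨a, b, r ++ [v], by rw [hstep, h1]; simp [bTopStep, hv, hv2], ?_, h3, ?_⟩
            · refine ((List.perm_append_singleton v t).trans (h2.cons v)).trans ?_
              refine List.Perm.trans (List.Perm.swap a v _) ?_
              refine List.Perm.trans (List.Perm.cons a (List.Perm.swap b v r)) ?_
              exact List.Perm.cons a (List.Perm.cons b (List.perm_append_singleton v r).symm)
            · intro x hx
              rcases List.mem_append.mp hx with hx | hx
              · exact h4 x hx
              · simp at hx; omega

-- any two entries taken at distinct positions sum to at most top1 + top2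
theorem sum_le_pair (vals : List Int) (p q a b : Int) (r : List Int)
    (hsub : [p, q].Subperm vals) (hperm : vals.Perm (a :: b :: r))
    (hba : b ≤ a) (hr : ∀ x ∈ r, x ≤ b) : p + q ≤ a + b := by
  have hsub' : [p, q].Subperm (a :: b :: r) := hsub.trans hperm.subperm
  have hle : ∀ z ∈ a :: b :: r, z ≤ a := by
    intro z hz
    rcases List.mem_cons.mp hz with rfl | hz
    · exact le_refl z
    rcases List.mem_cons.mp hz with rfl | hz
    · exact hba
    · exact le_trans (hr z hz) hba
  have hpa : p ≤ a := hle p (hsub'.subset (by simp))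
  have hqa : q ≤ a := hle q (hsub'.subset (by simp))
  by_cases hpb : p ≤ b
  · omega
  by_cases hqb : q ≤ b
  · omega
  exfalso
  have hcount := List.Subperm.countP_le (fun z => decide (b < z)) hsub'
  have h2p : b < p := by omega
  have h2q : b < q := by omega
  have hcl : List.countP (fun z => decide (b < z)) [p, q] = 2 := by
    simp [h2p, h2q]
  have hcr : List.countP (fun z => decide (b < z)) r = 0 := by
    refine List.countP_eq_zero.mpr ?_
    intro z hz
    have := hr z hz
    simp; omega
  rw [hcl] at hcount
  simp [List.countP_cons, hcr] at hcount
  split_ifs at hcount <;> omega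

-- ---- the tmp values of A's double loop ----

theorem mem_tmps (zs : List (Int × Int)) :
    ∀ v ∈ tmps zs, ∃ x y, [x, y].Sublist zs ∧ v = pairTmp x y := by
  induction zs with
  | nil => intro v hv; simp [tmps] at hv
  | cons z t ih =>
      intro v hv
      rcases List.mem_append.mp hv with hv | hv
      · obtain ⟨y, hy, rfl⟩ := List.mem_map.mp hv
        exact ⟨z, y, (List.singleton_sublist.mpr hy).cons₂ z, rfl⟩
      · obtain ⟨x, y, hs, rfl⟩ := ih v hv
        exact ⟨x, y, hs.cons z, rfl⟩

theorem tmps_mem (zs : List (Int × Int)) (x y : Int × Int) (h : [x, y].Sublist zs) :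
    pairTmp x y ∈ tmps zs := by
  induction zs with
  | nil => simp at h
  | cons z t ih =>
      cases h with
      | cons _ h' => exact List.mem_append.mpr (Or.inr (ih h'))
      | cons₂ _ h2 =>
          exact List.mem_append.mpr (Or.inl (List.mem_map.mpr ⟨y, List.singleton_sublist.mp h2, rfl⟩))

-- membership in the dict's items, for an element of zs
theorem mem_items_of_mem (zs : List (Int × Int)) (x : Int × Int) (hx : x ∈ zs) :
    ∃ m, (x.1, m) ∈ (buildDict zs).items ∧ x.2 ≤ m := by
  obtain ⟨m, hm, hle⟩ := buildDict_ge zs x hx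
  exact ⟨m, PySem.Dict.mem_items_of_get?_eq_some _ hm, hle⟩

-- ---- main: foldl max 0 (tmps zs) = B's core value ----

theorem main_eq (zs : List (Int × Int)) :
    (tmps zs).foldl max 0 =
      (match top2 (buildDict zs).values with
       | (some a, some b) => max 0 (a + b)
       | _ => 0) := by
  have hnd : (buildDict zs).keys.Nodup := nodup_keys_buildDict zs
  have hvals : (buildDict zs).values = (buildDict zs).items.map (·.2) := by
    simp only [PySem.Dict.values]
  rcases top2_inv (buildDict zs).values with ⟨h1, h2⟩ | ⟨a, h1, h2⟩ | ⟨a, b, r, h1, h2, h3, h4⟩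
  · rw [h1]
    have hz : zs = [] := by
      cases hzs : zs with
      | nil => rfl
      | cons z t =>
          exfalso
          obtain ⟨m, hm, _⟩ := mem_items_of_mem zs z (by rw [hzs]; simp)
          have hv : m ∈ (buildDict zs).values := by
            rw [hvals]
            exact List.mem_map.mpr ⟨(z.1, m), hm, rfl⟩
          rw [h2] at hv
          simp at hv
    rw [hz]
    rfl
  · rw [h1]
    have hone : ∀ x ∈ zs, ∃ m, (x.1, m) ∈ (buildDict zs).items := by
      intro x hx
      obtain ⟨m, hm, _⟩ := mem_items_of_mem zs x hx
      exact ⟨m, hm⟩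
    have hsingle : ∃ u, (buildDict zs).items = [(u, a)] := by
      have h2' : ((buildDict zs).items.map (·.2)) = [a] := by rw [← hvals, h2]
      cases hi : (buildDict zs).items with
      | nil => rw [hi] at h2'; simp at h2'
      | cons p t =>
          rw [hi] at h2'
          simp at h2'
          obtain ⟨hp, ht⟩ := h2'
          exact ⟨p.1, by rw [ht, ← hp]⟩
    obtain ⟨u, hu⟩ := hsingle
    have hall : ∀ v ∈ tmps zs, v ≤ 0 := by
      intro v hv
      obtain ⟨x, y, hs, rfl⟩ := mem_tmps zs v hv
      obtain ⟨mx, hmx⟩ := hone x (hs.subset (by simp))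
      obtain ⟨my, hmy⟩ := hone y (hs.subset (by simp))
      rw [hu] at hmx hmy
      simp at hmx hmy
      have : x.1 = y.1 := by rw [hmx.1, hmy.1]
      simp [pairTmp, this]
    exact le_antisymm (foldl_max_le _ 0 0 le_rfl hall) (PySem.List.le_foldl_max (tmps zs) 0).1
  · rw [h1]
    apply le_antisymm
    · -- every tmp is bounded by max 0 (a + b)
      refine foldl_max_le _ 0 _ (le_max_left _ _) ?_
      intro v hv
      obtain ⟨x, y, hs, rfl⟩ := mem_tmps zs v hv
      by_cases hxy : x.1 = y.1
      · simp [pairTmp, hxy]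
      · obtain ⟨mx, hmx, hxle⟩ := mem_items_of_mem zs x (hs.subset (by simp))
        obtain ⟨my, hmy, hyle⟩ := mem_items_of_mem zs y (hs.subset (by simp))
        have hne : ((x.1 : Int), mx) ≠ (y.1, my) := by
          intro hc
          exact hxy (Prod.ext_iff.mp hc).1
        have hsubv : [mx, my].Subperm (buildDict zs).values := by
          rw [hvals]
          exact subperm_map (·.2) (pair_subperm hmx hmy hne)
        have hb := sum_le_pair _ mx my a b r hsubv h2 h3 h4
        have : pairTmp x y ≤ a + b := by
          rw [pairTmp, if_pos hxy]
          omega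
        exact le_trans this (le_max_right _ _)
    · -- a + b is attained by an actual pair of zs with distinct uids
      refine max_le (PySem.List.le_foldl_max (tmps zs) 0).1 ?_
      have hab : [a, b].Subperm (buildDict zs).values := by
        have hs : [a, b].Sublist (a :: b :: r) := by
          exact (List.singleton_sublist.mpr (by simp)).cons₂ a
        exact hs.subperm.trans h2.symm.subperm
      obtain ⟨l', hl'perm, hl'sub⟩ := hab
      rw [hvals] at hl'sub
      obtain ⟨l'', hsub'', heq⟩ := List.sublist_map_iff.mp hl'sub
      have hlen : l''.length = 2 := by
        have := hl'perm.length_eq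
        rw [heq] at this
        simpa using this
      match l'', hlen with
      | [p, q], _ =>
      rw [heq] at hl'perm
      simp only [List.map_cons, List.map_nil] at hl'perm
      have hpq : p.1 ≠ q.1 := by
        intro hc
        have hkeys : [p.1, q.1].Sublist (buildDict zs).keys := by
          have := hsub''.map (·.1)
          simpa [PySem.Dict.keys] using this
        have hcnt := hkeys.count_le p.1
        rw [hc] at hcnt
        simp at hcnt
        have := List.nodup_iff_count_le_one.mp hnd q.1
        omega
      have hpz : (p.1, p.2) ∈ zs :=
        buildDict_mem zs p.1 p.2 (PySem.Dict.get?_of_mem_items _ (by simpa using hsub''.subset (by simp : p ∈ [p, q])) hnd)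
      have hqz : (q.1, q.2) ∈ zs :=
        buildDict_mem zs q.1 q.2 (PySem.Dict.get?_of_mem_items _ (by simpa using hsub''.subset (by simp : q ∈ [p, q])) hnd)
      have hnepq : ((p.1 : Int), p.2) ≠ (q.1, q.2) := by
        intro hc
        exact hpq (Prod.ext_iff.mp hc).1
      obtain ⟨w, hwperm, hwsub⟩ := pair_subperm hpz hqz hnepq
      have hwlen : w.length = 2 := by simpa using hwperm.length_eq
      match w, hwlen with
      | [x0, y0], _ =>
      have hmem : pairTmp x0 y0 ∈ tmps zs := tmps_mem zs x0 y0 hwsub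
      have hval : pairTmp x0 y0 = p.2 + q.2 := by
        rcases perm_pair_cases _ _ _ _ hwperm with ⟨hx, hy⟩ | ⟨hx, hy⟩ <;> rw [hx, hy]
        · rw [pairTmp, if_pos (by simpa using hpq)]
        · rw [pairTmp, if_pos (by simpa using (Ne.symm hpq))]
          exact add_comm _ _
      have hge := (PySem.List.le_foldl_max (tmps zs) 0).2 _ hmem
      rw [hval] at hge
      rcases perm_pair_cases _ _ _ _ hl'perm with ⟨hpa, hqb⟩ | ⟨hpb, hqa⟩
      · rw [hpa, hqb] at hge; exact hge
      · rw [hpb, hqa] at hge; omega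

-- ---- bridging the ports ----

theorem solve_alt_eq (uid profit : List Int) (n : Int)
    (h2 : 2 ≤ n) (hu : n ≤ (uid.length : Int)) (hp : n ≤ (profit.length : Int)) :
    solve_alt uid profit n =
      (match top2 (buildDict ((uid.take n.toNat).zip (profit.take n.toNat))).values with
       | (some a, some b) => max 0 (a + b)
       | _ => 0) := by
  set zs := (uid.take n.toNat).zip (profit.take n.toNat) with hzs
  have hlen : zs.length = n.toNat := by
    rw [hzs]
    simp
    omega
  have hzel : ∀ (k : Nat) (hk : k < zs.length), zs[k] = (uid[k]'(by omega), profit[k]'(by omega)) := by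
    intro k hk
    simp [hzs, List.getElem_zip, List.getElem_take]
  have hfold : (PySem.List.pyRange 0 n 1).foldl
      (fun d i => bDictStep d (PySem.List.pyGetD uid i 0, PySem.List.pyGetD profit i 0))
      PySem.Dict.empty = buildDict zs := by
    have hcongr : (PySem.List.pyRange 0 n 1).foldl
        (fun d i => bDictStep d (PySem.List.pyGetD uid i 0, PySem.List.pyGetD profit i 0))
        PySem.Dict.empty =
        (PySem.List.pyRange 0 n 1).foldl
          (fun d i => bDictStep d (PySem.List.pyGetD zs i (0, 0))) PySem.Dict.empty := by
      refine PySem.List.foldl_congr_mem _ _ _ _ ?_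
      intro acc i hi
      have hi' := (PySem.List.mem_pyRange_one).mp hi
      have hi0 : 0 ≤ i := hi'.1
      have hiz : i.toNat < zs.length := by omega
      rw [PySem.List.pyGetD_eq_getElem uid 0 hi0 (by omega),
          PySem.List.pyGetD_eq_getElem profit 0 hi0 (by omega),
          PySem.List.pyGetD_eq_getElem zs (0, 0) hi0 (by omega)]
      rw [hzel i.toNat hiz]
    rw [hcongr]
    have hzn : n = (zs.length : Int) := by omega
    conv_lhs => rw [hzn]
    rw [PySem.List.foldl_pyRange_pyGetD' zs (0, 0) bDictStep PySem.Dict.empty (le_refl 0)]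
    simp [buildDict]
  rw [solve_alt, if_neg (by omega), hfold]
  rfl

theorem tmps_short (l : List (Int × Int)) (h : l.length ≤ 1) : tmps l = [] := by
  match l, h with
  | [], _ => rfl
  | [x], _ => simp [tmps]

-- the inner loop of A, for a fixed outer index i, folds max over the tmp values of
-- the pairs (zs[i], y), y after position i in zs
theorem inner_eq (uid profit : List Int) (n i : Int)
    (hu : n ≤ (uid.length : Int)) (hp : n ≤ (profit.length : Int))
    (hi0 : 0 ≤ i) (hin : i < n) (sm : Int) :
    (PySem.List.pyRange (i + 1) n 1).foldl (fun sm j =>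
      let tmp : Int :=
        if PySem.List.pyGetD uid i 0 ≠ PySem.List.pyGetD uid j 0 then
          PySem.List.pyGetD profit i 0 + PySem.List.pyGetD profit j 0
        else 0
      if sm ≤ tmp then tmp else sm) sm =
    ((((uid.take n.toNat).zip (profit.take n.toNat)).drop (i.toNat + 1)).map
        (pairTmp (((uid.take n.toNat).zip (profit.take n.toNat)).getD i.toNat (0, 0)))).foldl max sm := by
  set zs := (uid.take n.toNat).zip (profit.take n.toNat) with hzs
  have hlen : zs.length = n.toNat := by
    rw [hzs]
    simp
    omega
  have hzel : ∀ (k : Nat) (hk : k < zs.length), zs[k] = (uid[k]'(by omega), profit[k]'(by omega)) := by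
    intro k hk
    simp [hzs, List.getElem_zip, List.getElem_take]
  have hcongr : (PySem.List.pyRange (i + 1) n 1).foldl (fun sm j =>
      let tmp : Int :=
        if PySem.List.pyGetD uid i 0 ≠ PySem.List.pyGetD uid j 0 then
          PySem.List.pyGetD profit i 0 + PySem.List.pyGetD profit j 0
        else 0
      if sm ≤ tmp then tmp else sm) sm =
      (PySem.List.pyRange (i + 1) n 1).foldl (fun sm j =>
        max sm (pairTmp (zs.getD i.toNat (0, 0)) (PySem.List.pyGetD zs j (0, 0)))) sm := by
    refine PySem.List.foldl_congr_mem _ _ _ _ ?_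
    intro acc j hj
    have hj' := (PySem.List.mem_pyRange_one).mp hj
    have hj0 : 0 ≤ j := by omega
    have hjn : j < n := hj'.2
    have hjz : j.toNat < zs.length := by omega
    have hiz : i.toNat < zs.length := by omega
    rw [PySem.List.pyGetD_eq_getElem uid 0 hi0 (by omega),
        PySem.List.pyGetD_eq_getElem uid 0 hj0 (by omega),
        PySem.List.pyGetD_eq_getElem profit 0 hi0 (by omega),
        PySem.List.pyGetD_eq_getElem profit 0 hj0 (by omega),
        PySem.List.pyGetD_eq_getElem zs (0, 0) hj0 (by omega)]
    rw [List.getD_eq_getElem zs (0, 0) hiz]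
    rw [hzel i.toNat hiz, hzel j.toNat hjz]
    rw [pairTmp]
    rw [max_def]
  rw [hcongr]
  have hzn : n = (zs.length : Int) := by omega
  conv_lhs => rw [hzn]
  rw [PySem.List.foldl_pyRange_pyGetD' zs (0, 0)
        (fun acc y => max acc (pairTmp (zs.getD i.toNat (0, 0)) y)) sm (by omega)]
  rw [← List.foldl_map]
  have hnt : (i + 1).toNat = i.toNat + 1 := by omega
  rw [hnt]

theorem solve_eq_tmps (uid profit : List Int) (n : Int)
    (h : Pre_solve uid profit n) :
    solve uid profit n = (tmps ((uid.take n.toNat).zip (profit.take n.toNat))).foldl max 0 := by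
  set zs := (uid.take n.toNat).zip (profit.take n.toNat) with hzs
  by_cases hn2 : 2 ≤ n
  · obtain ⟨hu, hp⟩ := h hn2
    have hlen : zs.length = n.toNat := by
      rw [hzs]
      simp
      omega
    have key : ∀ (k : Nat) (a : Int), 0 ≤ a → a ≤ n → (n - a).toNat = k → ∀ sm : Int,
        (PySem.List.pyRange a n 1).foldl (fun sm i =>
          (PySem.List.pyRange (i + 1) n 1).foldl (fun sm j =>
            let tmp : Int :=
              if PySem.List.pyGetD uid i 0 ≠ PySem.List.pyGetD uid j 0 then
                PySem.List.pyGetD profit i 0 + PySem.List.pyGetD profit j 0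
              else 0
            if sm ≤ tmp then tmp else sm) sm) sm =
        (tmps (zs.drop a.toNat)).foldl max sm := by
      intro k
      induction k with
      | zero =>
          intro a h0 h1 hk sm
          have ha : a = n := by omega
          rw [ha, PySem.List.pyRange_one_eq_nil (le_refl n)]
          rw [List.drop_eq_nil_of_le (by omega)]
          rfl
      | succ k ih =>
          intro a h0 h1 hk sm
          have han : a < n := by omega
          have hat : a.toNat < zs.length := by omega
          rw [PySem.List.pyRange_one_cons han]
          rw [List.foldl_cons]
          rw [inner_eq uid profit n a hu hp h0 han sm]
          rw [ih (a + 1) (by omega) (by omega) (by omega)]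
          rw [List.drop_eq_getElem_cons hat]
          rw [tmps]
          rw [List.foldl_append]
          have hnt : (a + 1).toNat = a.toNat + 1 := by omega
          rw [hnt, List.getD_eq_getElem zs (0, 0) hat]
    have hk := key (n - 0).toNat 0 (le_refl 0) (by omega) rfl 0
    rw [solve]
    simpa using hk
  · -- n ≤ 1: no pair is examined and zs carries at most one element
    have hz : tmps zs = [] := by
      refine tmps_short zs ?_
      rw [hzs]
      simp
      omega
    rw [hz]
    by_cases hn0 : n ≤ 0
    · rw [solve, PySem.List.pyRange_one_eq_nil (by omega)]
      rfl
    · have hn1 : n = 1 := by omega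
      rw [solve, hn1]
      have h01 : PySem.List.pyRange 0 1 1 = [0] := by decide
      rw [h01]
      simp [PySem.List.pyRange_one_eq_nil]

-- ===== VERDICT (by name: the statement is the Claim_ definition above) =====
theorem solve_spec : Claim_equal_solve := by
  intro uid profit n _ hpre
  unfold Spec_solve
  rw [solve_eq_tmps uid profit n hpre]
  by_cases h2 : 2 ≤ n
  · obtain ⟨hu, hp⟩ := hpre h2
    rw [solve_alt_eq uid profit n h2 hu hp, ← main_eq]
  · have hz : tmps ((uid.take n.toNat).zip (profit.take n.toNat)) = [] := by
      refine tmps_short _ ?_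
      simp
      omega
    rw [hz, solve_alt, if_pos (by omega)]
    rfl
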